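-- pv_equiv track=rewrite | github.com/versenyi98/advent-of-code-solutions | solutions/2022/Day 18 - Boiling Boulders/main.py | calculate_outer_area
-- ===== SOURCE A (Python) =====
-- def calculate_outer_area(cubes, air):
--     area = 0
--
--     directions = [(1, 0, 0), (-1, 0, 0), (0, 1, 0), (0, -1, 0), (0, 0, 1), (0, 0, -1)]
--     for x, y, z in cubes:
--         side_not_covered = 0
--         for dx, dy, dz in directions:
--             if (x + dx, y + dy, z + dz) in air:
--                 side_not_covered += 1
--         area += side_not_covered
--     return area
-- ===== SOURCE B (Python) =====
-- def calculate_outer_area(cubes, air):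
--     # multiplicity of each "exposed face" position: for every distinct air cell,
--     # bump a counter at each of its 6 neighbouring positions
--     exposed = {}
--     for ax, ay, az in set(air):
--         for n in ((ax + 1, ay, az), (ax - 1, ay, az),
--                   (ax, ay + 1, az), (ax, ay - 1, az),
--                   (ax, ay, az + 1), (ax, ay, az - 1)):
--             exposed[n] = exposed.get(n, 0) + 1
--     return sum(exposed.get(c, 0) for c in cubes)
-- ===== Notes on version B (the rewrite author's own statement) =====
-- stated objective: faster
-- what changed: Instead of scanning the air list for each of a cube's 6 neighbors (nested linear membership scans), B traverses the distinct air cells once, building a dict that counts how many air cells are adjacent to each position, and then the result is a single pass summing that dict's count at each cube.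
import Mathlib
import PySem

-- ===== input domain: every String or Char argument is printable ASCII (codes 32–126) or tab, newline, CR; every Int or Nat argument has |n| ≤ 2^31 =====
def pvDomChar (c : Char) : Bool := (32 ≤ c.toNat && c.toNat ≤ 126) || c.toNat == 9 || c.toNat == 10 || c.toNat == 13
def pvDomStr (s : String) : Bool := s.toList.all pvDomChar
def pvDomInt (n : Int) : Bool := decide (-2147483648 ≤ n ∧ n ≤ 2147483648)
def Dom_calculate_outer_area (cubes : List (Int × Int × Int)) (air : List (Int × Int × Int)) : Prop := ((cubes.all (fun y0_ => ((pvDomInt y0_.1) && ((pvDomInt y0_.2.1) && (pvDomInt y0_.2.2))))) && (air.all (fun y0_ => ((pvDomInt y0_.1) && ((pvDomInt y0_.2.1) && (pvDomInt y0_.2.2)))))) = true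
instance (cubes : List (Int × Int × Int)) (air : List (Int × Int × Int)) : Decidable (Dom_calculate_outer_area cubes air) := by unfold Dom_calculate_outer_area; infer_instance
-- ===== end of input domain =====

-- B replaces A's per-cube linear scans of the air list by one pass over the distinct air
-- cells building a counter of positions adjacent to air, then one summing pass over the
-- cubes (objective: faster).

-- ===== PORT A =====
def calculate_outer_area (cubes : List (Int × Int × Int)) (air : List (Int × Int × Int)) : Int :=
  let directions : List (Int × Int × Int) :=
    [(1, 0, 0), (-1, 0, 0), (0, 1, 0), (0, -1, 0), (0, 0, 1), (0, 0, -1)]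
  cubes.foldl (fun area c =>
    let side_not_covered : Int := directions.foldl (fun snc d =>
      if (c.1 + d.1, c.2.1 + d.2.1, c.2.2 + d.2.2) ∈ air then snc + 1 else snc) 0
    area + side_not_covered) 0

-- ===== PORT B =====
def calculate_outer_area_alt (cubes : List (Int × Int × Int)) (air : List (Int × Int × Int)) : Int :=
  let exposed : PySem.Dict (Int × Int × Int) Int :=
    (PySem.Set.ofList air).foldl (fun d a =>
      [(a.1 + 1, a.2.1, a.2.2), (a.1 - 1, a.2.1, a.2.2),
       (a.1, a.2.1 + 1, a.2.2), (a.1, a.2.1 - 1, a.2.2),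
       (a.1, a.2.1, a.2.2 + 1), (a.1, a.2.1, a.2.2 - 1)].foldl
        (fun d n => d.insert n (d.getD n 0 + 1)) d) PySem.Dict.empty
  (cubes.map (fun c => exposed.getD c 0)).sum

-- ===== PRECONDITION & SPEC =====
def Spec_calculate_outer_area (cubes : List (Int × Int × Int)) (air : List (Int × Int × Int)) (out : Int) : Prop := out = calculate_outer_area_alt cubes air
instance (cubes : List (Int × Int × Int)) (air : List (Int × Int × Int)) (out : Int) : Decidable (Spec_calculate_outer_area cubes air out) := by unfold Spec_calculate_outer_area; infer_instance

-- ===== CLAIM (what is proved, stated in full; the proofs are below) =====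
def Claim_equal_calculate_outer_area : Prop := ∀ (cubes : List (Int × Int × Int)) (air : List (Int × Int × Int)), Dom_calculate_outer_area cubes air → Spec_calculate_outer_area cubes air (calculate_outer_area cubes air)

-- ===== LEMMAS AND PROOFS =====

-- the six directions (A's list) and the six neighbours of a cell
def pvDirs : List (Int × Int × Int) :=
  [(1, 0, 0), (-1, 0, 0), (0, 1, 0), (0, -1, 0), (0, 0, 1), (0, 0, -1)]

def pvNbrs (c : Int × Int × Int) : List (Int × Int × Int) :=
  pvDirs.map (fun d => (c.1 + d.1, c.2.1 + d.2.1, c.2.2 + d.2.2))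

-- B's explicit neighbour tuple equals the direction-offset list A uses
theorem pvNbrs_eq (a : Int × Int × Int) :
    [(a.1 + 1, a.2.1, a.2.2), (a.1 - 1, a.2.1, a.2.2),
     (a.1, a.2.1 + 1, a.2.2), (a.1, a.2.1 - 1, a.2.2),
     (a.1, a.2.1, a.2.2 + 1), (a.1, a.2.1, a.2.2 - 1)] = pvNbrs a := by
  obtain ⟨x, y, z⟩ := a
  simp [pvNbrs, pvDirs, Int.sub_eq_add_neg]

theorem pvNbrs_nodup (c : Int × Int × Int) : (pvNbrs c).Nodup := by
  obtain ⟨x, y, z⟩ := c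
  simp only [pvNbrs, pvDirs, List.map_cons, List.map_nil, List.nodup_cons, List.mem_cons,
    List.not_mem_nil, or_false, List.nodup_nil, and_true, not_or, Prod.mk.injEq, not_and]
  repeat' apply And.intro
  all_goals intros
  all_goals try omega
  all_goals simp_all

theorem pvNbrs_symm (a c : Int × Int × Int) : a ∈ pvNbrs c ↔ c ∈ pvNbrs a := by
  obtain ⟨a1, a2, a3⟩ := a
  obtain ⟨c1, c2, c3⟩ := c
  simp only [pvNbrs, pvDirs, List.map_cons, List.map_nil, List.mem_cons, List.not_mem_nil,
    or_false, Prod.mk.injEq]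
  constructor <;>
    rintro (⟨h1, h2, h3⟩ | ⟨h1, h2, h3⟩ | ⟨h1, h2, h3⟩ | ⟨h1, h2, h3⟩ | ⟨h1, h2, h3⟩ | ⟨h1, h2, h3⟩) <;>
    omega

-- a loop 'for d in l: if P (g d): acc += 1' as a sum of indicators of the mapped elements
theorem pvFoldlIte (P : (Int × Int × Int) → Prop) [DecidablePred P]
    (g : (Int × Int × Int) → (Int × Int × Int)) :
    ∀ (l : List (Int × Int × Int)) (init : Int),
      l.foldl (fun acc d => if P (g d) then acc + 1 else acc) init
        = init + ((l.map g).map (fun n => if P n then (1 : Int) else 0)).sum := by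
  intro l
  induction l with
  | nil => intro init; simp
  | cons d l ih =>
    intro init
    rw [List.foldl_cons, ih, List.map_cons, List.map_cons, List.sum_cons]
    by_cases h : P (g d) <;> simp [h]
    ring

-- Σ_{a∈S} [a = x] = [x ∈ S] for a Nodup list S
theorem pvSumInd (S : List (Int × Int × Int)) (hS : S.Nodup) (x : Int × Int × Int) :
    (S.map (fun a => if a = x then (1 : Int) else 0)).sum = if x ∈ S then 1 else 0 := by
  induction S with
  | nil => simp
  | cons s S ih =>
    rw [List.nodup_cons] at hS
    rw [List.map_cons, List.sum_cons, ih hS.2]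
    by_cases h1 : s = x
    · subst h1; simp [hS.1]
    · have h2 : ¬ x = s := fun e => h1 e.symm
      simp [h1, h2, List.mem_cons]

-- |S ∩ N| counted from either side, both lists Nodup
theorem pvInterSym (S N : List (Int × Int × Int)) (hS : S.Nodup) (hN : N.Nodup) :
    (S.map (fun a => if a ∈ N then (1 : Int) else 0)).sum
      = (N.map (fun n => if n ∈ S then (1 : Int) else 0)).sum := by
  induction N with
  | nil => simp
  | cons n N ih =>
    rw [List.nodup_cons] at hN
    have hsplit : (S.map (fun a => if a ∈ n :: N then (1 : Int) else 0))
        = S.map (fun a => (if a = n then (1 : Int) else 0) + (if a ∈ N then (1 : Int) else 0)) := by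
      apply List.map_congr_left
      intro a _
      by_cases h1 : a = n
      · subst h1; simp [hN.1]
      · simp [h1, List.mem_cons]
    rw [hsplit, PySem.List.sum_map_add_int, ih hN.2, pvSumInd S hS n]
    simp

-- A's value as a sum over cubes of the number of neighbours lying in air
theorem pvA_sum (cubes air : List (Int × Int × Int)) :
    calculate_outer_area cubes air
      = (cubes.map (fun c => ((pvNbrs c).map (fun n => if n ∈ air then (1 : Int) else 0)).sum)).sum := by
  simp only [calculate_outer_area]
  rw [PySem.List.foldl_add cubes _ 0, Int.zero_add]
  congr 1
  apply List.map_congr_left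
  intro c _
  rw [pvFoldlIte (fun n => n ∈ air) (fun d => (c.1 + d.1, c.2.1 + d.2.1, c.2.2 + d.2.2))
    [(1, 0, 0), (-1, 0, 0), (0, 1, 0), (0, -1, 0), (0, 0, 1), (0, 0, -1)] 0, Int.zero_add]
  rw [show [((1:Int), (0:Int), (0:Int)), (-1, 0, 0), (0, 1, 0), (0, -1, 0), (0, 0, 1), (0, 0, -1)] = pvDirs from rfl]
  rw [show pvDirs.map (fun d => (c.1 + d.1, c.2.1 + d.2.1, c.2.2 + d.2.2)) = pvNbrs c from rfl]

-- the number of distinct air cells adjacent to c, counted two ways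
theorem pvCnt (air : List (Int × Int × Int)) (c : Int × Int × Int) :
    ((((PySem.Set.ofList air).flatMap pvNbrs).count c : Nat) : Int)
      = ((pvNbrs c).map (fun n => if n ∈ air then (1 : Int) else 0)).sum := by
  have h1 : ∀ S : List (Int × Int × Int),
      (((S.flatMap pvNbrs).count c : Nat) : Int)
        = (S.map (fun a => if a ∈ pvNbrs c then (1 : Int) else 0)).sum := by
    intro S
    induction S with
    | nil => simp
    | cons a S ih =>
      rw [List.flatMap_cons, List.count_append, List.map_cons, List.sum_cons]
      push_cast
      rw [ih]
      congr 1
      by_cases h : c ∈ pvNbrs a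
      · have h' := (pvNbrs_symm a c).mpr h
        rw [List.count_eq_one_of_mem (pvNbrs_nodup a) h]
        simp [h']
      · have h' : a ∉ pvNbrs c := fun hm => h ((pvNbrs_symm a c).mp hm)
        rw [List.count_eq_zero_of_not_mem h, if_neg h']
        simp
  rw [h1, pvInterSym (PySem.Set.ofList air) (pvNbrs c)
    (PySem.Set.nodup_ofList air) (pvNbrs_nodup c)]
  apply congrArg
  apply List.map_congr_left
  intro n _
  simp [PySem.Set.mem_ofList]

-- B's value as a sum over cubes of the flattened air-neighbour multiplicities
theorem pvB_sum (cubes air : List (Int × Int × Int)) :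
    calculate_outer_area_alt cubes air
      = (cubes.map (fun c => ((((PySem.Set.ofList air).flatMap pvNbrs).count c : Nat) : Int))).sum := by
  simp only [calculate_outer_area_alt]
  have hfold : (PySem.Set.ofList air).foldl (fun d a =>
      [(a.1 + 1, a.2.1, a.2.2), (a.1 - 1, a.2.1, a.2.2),
       (a.1, a.2.1 + 1, a.2.2), (a.1, a.2.1 - 1, a.2.2),
       (a.1, a.2.1, a.2.2 + 1), (a.1, a.2.1, a.2.2 - 1)].foldl
        (fun d n => d.insert n (d.getD n 0 + 1)) d)
      (PySem.Dict.empty : PySem.Dict (Int × Int × Int) Int)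
      = ((PySem.Set.ofList air).flatMap pvNbrs).foldl
          (fun d n => d.insert n (d.getD n 0 + 1)) PySem.Dict.empty := by
    rw [List.foldl_flatMap]
    apply PySem.List.foldl_congr_mem
    intro d a _
    rw [pvNbrs_eq a]
  rw [hfold]
  apply congrArg
  apply List.map_congr_left
  intro c _
  rw [PySem.Dict.getD_foldl_insert_add_one]
  simp

-- ===== VERDICT (by name: the statement is the Claim_ definition above) =====
theorem calculate_outer_area_spec : Claim_equal_calculate_outer_area := by
  intro cubes air _
  show calculate_outer_area cubes air = calculate_outer_area_alt cubes air
  rw [pvA_sum, pvB_sum]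
  apply congrArg
  apply List.map_congr_left
  intro c _
  rw [pvCnt]
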